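-- pv_equiv track=rewrite | github.com/JuneWangRL/Leetcode | leetcode826.py | answer826
-- ===== SOURCE A (Python) =====
-- def answer826(dif,pro,wrk):
--
--     for i in range(len(dif)):
--         for j in range(i+1,len(dif)):
--             if dif[i]>dif[j]:
--                 t=dif[i]
--                 dif[i]=dif[j]
--                 dif[j]=t
--                 t=pro[i]
--                 pro[i]=pro[j]
--                 pro[j]=t
--     maxx=list()
--     for i in range(len(wrk)):
--         for j in  range(len(dif)-1,-1,-1):
--             if dif[j]<=wrk[i]:
--                 maxx.append(max(pro[:j+1]))
--                 break
--     return(sum(maxx))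
-- ===== SOURCE B (Python) =====
-- def answer826(dif, pro, wrk):
--     jobs = sorted(zip(dif, pro), key=lambda j: j[0])
--     ds = [d for d, _ in jobs]
--     best = []
--     cur = 0
--     for _, p in jobs:
--         cur = p if not best else max(cur, p)
--         best.append(cur)
--     total = 0
--     for w in wrk:
--         lo, hi = 0, len(ds)
--         while lo < hi:
--             mid = (lo + hi) // 2
--             if ds[mid] <= w:
--                 lo = mid + 1
--             else:
--                 hi = mid
--         if lo:
--             total += best[lo - 1]
--     return total
-- ===== Notes on version B (the rewrite author's own statement) =====
-- stated objective: faster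
-- what changed: A bubble-sorts difficulty/profit in place with an O(n^2) exchange sort and, per worker, scans indices from the top and recomputes max(pro[:j+1]) over a slice; B sorts (difficulty, profit) pairs with the library sort, builds a prefix-maximum array in one pass, and answers each worker with a hand-written binary search.
-- outside the precondition, e.g. on answer826([1, 2], [5], [1]): A returns 5, B returns 5; on answer826([2, 1], [7], [1]): A raises IndexError, B returns 0; on answer826([1], [], [1]): A raises ValueError, B returns 0
import Mathlib
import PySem

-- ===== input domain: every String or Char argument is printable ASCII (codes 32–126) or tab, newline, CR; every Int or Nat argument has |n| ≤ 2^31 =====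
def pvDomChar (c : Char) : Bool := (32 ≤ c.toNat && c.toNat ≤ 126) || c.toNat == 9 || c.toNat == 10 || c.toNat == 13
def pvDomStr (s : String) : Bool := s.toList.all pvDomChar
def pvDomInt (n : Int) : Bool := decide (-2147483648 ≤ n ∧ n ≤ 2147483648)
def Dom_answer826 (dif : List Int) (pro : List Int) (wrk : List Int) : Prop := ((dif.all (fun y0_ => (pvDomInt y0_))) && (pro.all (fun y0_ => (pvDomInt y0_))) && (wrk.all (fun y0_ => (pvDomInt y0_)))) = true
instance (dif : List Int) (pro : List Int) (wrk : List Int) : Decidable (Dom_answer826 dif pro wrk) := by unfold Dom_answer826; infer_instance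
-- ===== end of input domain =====

-- B replaces A's O(n^2) exchange sort and per-worker backward scan (each recomputing a max over a
-- profit slice) by a key-sort of (difficulty, profit) pairs, a one-pass prefix-maximum array and a
-- hand-written binary search per worker.  The equivalence is about the RETURN value only: A sorts
-- its dif/pro arguments in place, B does not mutate its arguments.

-- ===== PORT A =====
-- the three statements t=xs[i]; xs[i]=xs[j]; xs[j]=t (reads happen before both writes)
def pvSwap (xs : List Int) (i j : Nat) : List Int :=
  (xs.set i (xs.getD j 0)).set j (xs.getD i 0)

-- inner loop 'for j in range(i+1,len(dif))'; js is that range (indices are in range under Pre_)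
def pvInnerA (i : Nat) (js : List Nat) (d p : List Int) : List Int × List Int :=
  match js with
  | [] => (d, p)
  | j :: rest =>
      if d.getD i 0 > d.getD j 0 then pvInnerA i rest (pvSwap d i j) (pvSwap p i j)
      else pvInnerA i rest d p

-- outer loop 'for i in range(len(dif))'; len(dif) stays n throughout
def pvOuterA (n : Nat) (is : List Nat) (d p : List Int) : List Int × List Int :=
  match is with
  | [] => (d, p)
  | i :: rest =>
      let s := pvInnerA i (List.range' (i+1) (n - (i+1))) d p
      pvOuterA n rest s.1 s.2

-- 'for j in range(len(dif)-1,-1,-1): if dif[j]<=wrk[i]: maxx.append(max(pro[:j+1])); break'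
-- js = [n-1, …, 0]; max(...) is PySem.List.max? (the slice is nonempty under Pre_)
def pvScanA (d p : List Int) (w : Int) (js : List Nat) : Option Int :=
  match js with
  | [] => none
  | j :: rest =>
      if d.getD j 0 ≤ w then
        some ((PySem.List.max? (PySem.List.slice p none (some ((j : Int) + 1))) (fun y => y)).getD 0)
      else pvScanA d p w rest

def answer826 (dif : List Int) (pro : List Int) (wrk : List Int) : Int :=
  let n := dif.length
  let s := pvOuterA n (List.range' 0 n) dif pro
  let maxx := wrk.foldl (fun (acc : List Int) w =>
      match pvScanA s.1 s.2 w (List.range' 0 n).reverse with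
      | some m => acc ++ [m]
      | none => acc) []
  maxx.sum

-- ===== PORT B =====
-- the hand-written 'while lo < hi' binary search of Source B
def pvBsr (ds : List Int) (w : Int) (lo hi : Nat) : Nat :=
  if h : lo < hi then
    let mid := (lo + hi) / 2
    if ds.getD mid 0 ≤ w then pvBsr ds w (mid + 1) hi else pvBsr ds w lo mid
  else lo
termination_by hi - lo
decreasing_by all_goals omega

-- the prefix-maximum loop of Source B; state = (best, cur)
def pvBest (jobs : List (Int × Int)) : List Int × Int :=
  jobs.foldl (fun (acc : List Int × Int) jp =>
      let cur := if acc.1.isEmpty then jp.2 else max acc.2 jp.2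
      (acc.1 ++ [cur], cur)) ([], 0)

def answer826_alt (dif : List Int) (pro : List Int) (wrk : List Int) : Int :=
  let jobs := PySem.List.sorted (dif.zip pro) (fun j => j.1) false
  let ds := jobs.map (fun j => j.1)
  let best := (pvBest jobs).1
  wrk.foldl (fun total w =>
      let lo := pvBsr ds w 0 ds.length
      if lo ≠ 0 then total + best.getD (lo - 1) 0 else total) 0

-- ===== PRECONDITION & SPEC =====
-- Pre_ excludes inputs with fewer profits than difficulties: there A raises IndexError as soon as
-- its sort swaps at an index past len(pro) (and ValueError on max of an empty slice when pro is
-- empty), and only on accidentally favourable orderings does it still return a value.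
def Pre_answer826 (dif : List Int) (pro : List Int) (wrk : List Int) : Prop :=
  dif.length ≤ pro.length
instance (dif : List Int) (pro : List Int) (wrk : List Int) : Decidable (Pre_answer826 dif pro wrk) := by unfold Pre_answer826; infer_instance

def pvWitness_answer826 : List Int × List Int × List Int := ([4, 2, 8], [5, 1, 7], [3, 9])

def Spec_answer826 (dif : List Int) (pro : List Int) (wrk : List Int) (out : Int) : Prop := out = answer826_alt dif pro wrk
instance (dif : List Int) (pro : List Int) (wrk : List Int) (out : Int) : Decidable (Spec_answer826 dif pro wrk out) := by unfold Spec_answer826; infer_instance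

-- ===== CLAIM (what is proved, stated in full; the proofs are below) =====
def Claim_equal_answer826 : Prop := ∀ (dif : List Int) (pro : List Int) (wrk : List Int), Dom_answer826 dif pro wrk → Pre_answer826 dif pro wrk → Spec_answer826 dif pro wrk (answer826 dif pro wrk)

-- ===== LEMMAS AND PROOFS =====

-- The zipped shadow of A's exchange sort (proof device: A's two parallel lists as one pair list)
def pvSwapP (l : List (Int × Int)) (i j : Nat) : List (Int × Int) :=
  (l.set i (l.getD j (0, 0))).set j (l.getD i (0, 0))

def pvInnerZ (i : Nat) (js : List Nat) (l : List (Int × Int)) : List (Int × Int) :=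
  match js with
  | [] => l
  | j :: rest =>
      if (l.getD i (0, 0)).1 > (l.getD j (0, 0)).1 then pvInnerZ i rest (pvSwapP l i j)
      else pvInnerZ i rest l

def pvOuterZ (n : Nat) (is : List Nat) (l : List (Int × Int)) : List (Int × Int) :=
  match is with
  | [] => l
  | i :: rest => pvOuterZ n rest (pvInnerZ i (List.range' (i+1) (n - (i+1))) l)

-- the per-worker value both programs compute: best profit among pairs with difficulty ≤ w
def pvVal (l : List (Int × Int)) (w : Int) : Option Int :=
  ((l.filter (fun q => decide (q.1 ≤ w))).map Prod.snd).max?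

theorem max?_perm (l1 l2 : List Int) (h : l1.Perm l2) : l1.max? = l2.max? := by
  cases h1 : l1.max? with
  | none => rw [List.max?_eq_none_iff] at h1; subst h1; simp [h.nil_eq.symm]
  | some a =>
    rw [List.max?_eq_some_iff] at h1
    rw [eq_comm, List.max?_eq_some_iff]
    exact ⟨h.mem_iff.mp h1.1, fun b hb => h1.2 b (h.mem_iff.mpr hb)⟩

theorem pvVal_perm (l1 l2 : List (Int × Int)) (h : l1.Perm l2) (w : Int) :
    pvVal l1 w = pvVal l2 w :=
  max?_perm _ _ ((h.filter _).map _)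

-- ---- simulation: A's two-list loops follow the zipped loops ----

theorem zip_getD (d p : List Int) (k : Nat) (hk : k < d.length) (hlen : d.length ≤ p.length) :
    (d.zip p).getD k (0, 0) = (d.getD k 0, p.getD k 0) := by
  have h2 : k < p.length := lt_of_lt_of_le hk hlen
  rw [List.getD_eq_getElem _ _ (by simp; omega), List.getD_eq_getElem _ _ hk, List.getD_eq_getElem _ _ h2]
  simp

theorem zip_set (d p : List Int) (k : Nat) (a b : Int) :
    (d.set k a).zip (p.set k b) = (d.zip p).set k (a, b) := by
  apply List.ext_getElem (by simp)
  intro m h1 h2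
  by_cases hm : k = m
  · subst hm; simp [List.getElem_zip]
  · simp [List.getElem_zip, List.getElem_set, hm]

theorem map_snd_zip' (d p : List Int) (h : d.length ≤ p.length) :
    (d.zip p).map Prod.snd = p.take d.length := by
  apply List.ext_getElem
  · simp
  · intro m h1 h2
    simp [List.getElem_zip]

theorem zip_trunc (a b t : List Int) (h : a.length = b.length) : a.zip (b ++ t) = a.zip b := by
  apply List.ext_getElem (by simp; omega)
  intro m h1 h2
  simp at h1 h2
  simp [List.getElem_zip, List.getElem_append, h2]

theorem swap_zip (d p : List Int) (i j : Nat) (hi : i < d.length) (hj : j < d.length)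
    (hlen : d.length ≤ p.length) :
    (pvSwap d i j).zip (pvSwap p i j) = pvSwapP (d.zip p) i j := by
  unfold pvSwap pvSwapP
  rw [zip_set, zip_set, zip_getD d p j hj hlen, zip_getD d p i hi hlen]

theorem innerA_sim (i : Nat) (js : List Nat) (d p : List Int)
    (hi : i < d.length) (hjs : ∀ j ∈ js, j < d.length) (hlen : d.length ≤ p.length) :
    pvInnerA i js d p =
      ((pvInnerZ i js (d.zip p)).map Prod.fst,
       (pvInnerZ i js (d.zip p)).map Prod.snd ++ p.drop d.length) := by
  induction js generalizing d p with
  | nil =>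
    simp only [pvInnerA, pvInnerZ]
    rw [List.map_fst_zip hlen, map_snd_zip' _ _ hlen, List.take_append_drop]
  | cons j rest ih =>
    have hj : j < d.length := hjs j (by simp)
    have hrest : ∀ x ∈ rest, x < d.length := fun x hx => hjs x (by simp [hx])
    simp only [pvInnerA, pvInnerZ]
    rw [zip_getD d p i hi hlen, zip_getD d p j hj hlen]
    by_cases hcond : d.getD i 0 > d.getD j 0
    · rw [if_pos hcond, if_pos (by exact hcond)]
      have hld : (pvSwap d i j).length = d.length := by simp [pvSwap]
      have hlp : (pvSwap p i j).length = p.length := by simp [pvSwap]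
      have hdrop : (pvSwap p i j).drop d.length = p.drop d.length := by
        unfold pvSwap
        rw [List.drop_set_of_lt hj, List.drop_set_of_lt hi]
      rw [ih (pvSwap d i j) (pvSwap p i j) (hld ▸ hi) (fun x hx => hld ▸ hrest x hx)
            (by rw [hld, hlp]; exact hlen)]
      rw [swap_zip d p i j hi hj hlen, hld, hdrop]
    · rw [if_neg hcond, if_neg (by exact hcond)]
      exact ih d p hi hrest hlen

theorem length_swapP (l : List (Int × Int)) (i j : Nat) : (pvSwapP l i j).length = l.length := by
  simp [pvSwapP]

theorem length_innerZ (i : Nat) (js : List Nat) (l : List (Int × Int)) :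
    (pvInnerZ i js l).length = l.length := by
  induction js generalizing l with
  | nil => rfl
  | cons j rest ih => simp only [pvInnerZ]; split <;> simp [ih, length_swapP]

theorem outerA_sim (n : Nat) (is : List Nat) (d p : List Int)
    (hn : d.length = n) (hlen : d.length ≤ p.length) (his : ∀ i ∈ is, i < n) :
    pvOuterA n is d p =
      ((pvOuterZ n is (d.zip p)).map Prod.fst,
       (pvOuterZ n is (d.zip p)).map Prod.snd ++ p.drop n) := by
  induction is generalizing d p with
  | nil =>
    simp only [pvOuterA, pvOuterZ]
    rw [List.map_fst_zip hlen, map_snd_zip' _ _ hlen, hn, List.take_append_drop]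
  | cons i rest ih =>
    have hzlen : (d.zip p).length = n := by simp; omega
    have hi : i < d.length := by rw [hn]; exact his i (by simp)
    have hsim := innerA_sim i (List.range' (i+1) (n - (i+1))) d p hi
      (by intro j hj; rw [List.mem_range'] at hj; omega) hlen
    simp only [pvOuterA, pvOuterZ]
    rw [hsim]
    have hLlen : (pvInnerZ i (List.range' (i+1) (n - (i+1))) (d.zip p)).length = n := by
      rw [length_innerZ]; exact hzlen
    have hdlen : ((pvInnerZ i (List.range' (i+1) (n - (i+1))) (d.zip p)).map Prod.fst).length = n := by
      simp [hLlen]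
    rw [ih _ _ hdlen (by simp [hLlen]) (fun x hx => his x (by simp [hx]))]
    set L := pvInnerZ i (List.range' (i+1) (n - (i+1))) (d.zip p) with hL
    rw [hn]
    have hzip : (L.map Prod.fst).zip (L.map Prod.snd ++ p.drop n) = L := by
      rw [zip_trunc _ _ _ (by simp)]
      exact (List.zip_of_prod rfl rfl).symm
    have hdrop : (L.map Prod.snd ++ p.drop n).drop n = p.drop n := by
      rw [List.drop_append_of_le_length (by simp [hLlen])]
      simp [hLlen]
    rw [hzip, hdrop]

-- ---- the exchange sort sorts ----

theorem getD_set_self (l : List (Int × Int)) (a : Nat) (x : Int × Int) (ha : a < l.length) :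
    (l.set a x).getD a (0,0) = x := by
  rw [List.getD_eq_getElem _ _ (by simp [ha])]; simp

theorem getD_set_ne (l : List (Int × Int)) (a k : Nat) (x : Int × Int) (h : k ≠ a) :
    (l.set a x).getD k (0,0) = l.getD k (0,0) := by
  by_cases hk : k < l.length
  · rw [List.getD_eq_getElem _ _ (by simp [hk]), List.getD_eq_getElem _ _ hk]
    rw [List.getElem_set, if_neg (fun hh => h hh.symm)]
  · rw [List.getD_eq_default _ _ (by simp; omega), List.getD_eq_default _ _ (by omega)]

theorem swapP_getD_left (l : List (Int × Int)) (i j : Nat) (hij : i ≠ j) (hi : i < l.length) :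
    (pvSwapP l i j).getD i (0,0) = l.getD j (0,0) := by
  unfold pvSwapP
  rw [getD_set_ne _ _ _ _ hij, getD_set_self _ _ _ hi]

theorem swapP_getD_right (l : List (Int × Int)) (i j : Nat) (hj : j < l.length) :
    (pvSwapP l i j).getD j (0,0) = l.getD i (0,0) := by
  unfold pvSwapP
  rw [getD_set_self _ _ _ (by simp [hj])]

theorem swapP_getD_other (l : List (Int × Int)) (i j k : Nat) (h1 : k ≠ i) (h2 : k ≠ j) :
    (pvSwapP l i j).getD k (0,0) = l.getD k (0,0) := by
  unfold pvSwapP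
  rw [getD_set_ne _ _ _ _ h2, getD_set_ne _ _ _ _ h1]

theorem swapP_drop (l : List (Int × Int)) (i j s : Nat) (hi : i < s) (hj : j < s) :
    (pvSwapP l i j).drop s = l.drop s := by
  unfold pvSwapP
  rw [List.drop_set_of_lt hj, List.drop_set_of_lt hi]

theorem drop_eq_getD_cons (l : List (Int × Int)) (s : Nat) (hs : s < l.length) :
    l.drop s = l.getD s (0, 0) :: l.drop (s + 1) := by
  rw [List.getD_eq_getElem _ _ hs, List.drop_eq_getElem_cons hs]

theorem innerZ_spec (i : Nat) (s : Nat) (l : List (Int × Int))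
    (hi : i < s) (hs : s ≤ l.length) :
    (pvInnerZ i (List.range' s (l.length - s)) l).length = l.length ∧
    (∀ k, k < s → k ≠ i → (pvInnerZ i (List.range' s (l.length - s)) l).getD k (0,0) = l.getD k (0,0)) ∧
    ((pvInnerZ i (List.range' s (l.length - s)) l).getD i (0,0) ::
        (pvInnerZ i (List.range' s (l.length - s)) l).drop s).Perm
      (l.getD i (0,0) :: l.drop s) ∧
    (∀ q ∈ l.getD i (0,0) :: l.drop s,
      ((pvInnerZ i (List.range' s (l.length - s)) l).getD i (0,0)).1 ≤ q.1) := by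
  generalize hm : l.length - s = m
  induction m generalizing s l with
  | zero =>
    have hsl : s = l.length := by omega
    simp only [List.range'_zero, pvInnerZ]
    subst hsl
    simp [List.drop_length]
  | succ m ih =>
    have hsl : s < l.length := by omega
    rw [List.range'_succ]
    simp only [pvInnerZ]
    have hdrop : l.drop s = l.getD s (0,0) :: l.drop (s+1) := drop_eq_getD_cons l s hsl
    by_cases hc : (l.getD i (0,0)).1 > (l.getD s (0,0)).1
    · rw [if_pos hc]
      have hne : i ≠ s := by omega
      have hlen' : (pvSwapP l i s).length = l.length := length_swapP l i s
      have h'i : (pvSwapP l i s).getD i (0,0) = l.getD s (0,0) := swapP_getD_left l i s hne (by omega)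
      have h's : (pvSwapP l i s).getD s (0,0) = l.getD i (0,0) := swapP_getD_right l i s hsl
      have h'drop : (pvSwapP l i s).drop (s+1) = l.drop (s+1) := swapP_drop l i s (s+1) (by omega) (by omega)
      obtain ⟨ihlen, ihgetD, ihperm, ihmin⟩ := ih (s+1) (pvSwapP l i s) (by omega) (by omega) (by omega)
      set r := pvInnerZ i (List.range' (s+1) m) (pvSwapP l i s) with hr
      have hrdrop : r.drop s = r.getD s (0,0) :: r.drop (s+1) := drop_eq_getD_cons r s (by omega)
      have hrs : r.getD s (0,0) = l.getD i (0,0) := by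
        rw [ihgetD s (by omega) (by omega), h's]
      refine ⟨by omega, ?_, ?_, ?_⟩
      · intro k hk hki
        rw [ihgetD k (by omega) hki, swapP_getD_other l i s k hki (by omega)]
      · rw [hrdrop, hrs, hdrop]
        refine List.Perm.trans (List.Perm.swap _ _ _) ?_
        refine List.Perm.trans (List.Perm.cons _ ?_) (List.Perm.refl _)
        rw [← h'i, ← h'drop]
        exact ihperm
      · intro q hq
        rw [hdrop] at hq
        have hd1 : l.getD s (0,0) = (pvSwapP l i s).getD i (0,0) := h'i.symm
        rcases List.mem_cons.mp hq with hq | hq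
        · subst hq
          have h1 : (r.getD i (0,0)).1 ≤ ((pvSwapP l i s).getD i (0,0)).1 :=
            ihmin _ (List.mem_cons_self)
          rw [h'i] at h1
          exact le_trans h1 (le_of_lt hc)
        · rcases List.mem_cons.mp hq with hq | hq
          · subst hq
            rw [hd1]
            exact ihmin _ (List.mem_cons_self)
          · refine ihmin q (List.mem_cons_of_mem _ ?_)
            rw [h'drop]
            exact hq
    · rw [if_neg hc]
      obtain ⟨ihlen, ihgetD, ihperm, ihmin⟩ := ih (s+1) l (by omega) (by omega) (by omega)
      set r := pvInnerZ i (List.range' (s+1) m) l with hr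
      have hrdrop : r.drop s = r.getD s (0,0) :: r.drop (s+1) := drop_eq_getD_cons r s (by omega)
      have hrs : r.getD s (0,0) = l.getD s (0,0) := ihgetD s (by omega) (by omega)
      refine ⟨by omega, ?_, ?_, ?_⟩
      · intro k hk hki
        exact ihgetD k (by omega) hki
      · rw [hrdrop, hrs, hdrop]
        refine List.Perm.trans (List.Perm.swap _ _ _) ?_
        refine List.Perm.trans (List.Perm.cons _ ihperm) (List.Perm.swap _ _ _)
      · intro q hq
        rw [hdrop] at hq
        rcases List.mem_cons.mp hq with hq | hq
        · subst hq; exact ihmin _ (List.mem_cons_self)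
        · rcases List.mem_cons.mp hq with hq | hq
          · subst hq
            refine le_trans (ihmin _ (List.mem_cons_self)) ?_
            omega
          · exact ihmin q (List.mem_cons_of_mem _ hq)

theorem take_eq_of_getD (r l : List (Int × Int)) (s : Nat) (hrl : r.length = l.length)
    (hs : s ≤ l.length) (h : ∀ k, k < s → r.getD k (0,0) = l.getD k (0,0)) :
    r.take s = l.take s := by
  apply List.ext_getElem (by simp; omega)
  intro m h1 h2
  have hm : m < s := by simp at h1; omega
  have := h m hm
  rw [List.getD_eq_getElem _ _ (by omega), List.getD_eq_getElem _ _ (by omega)] at this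
  rw [List.getElem_take, List.getElem_take]
  exact this

theorem outerZ_spec (n : Nat) (s : Nat) (l : List (Int × Int))
    (hn : l.length = n) (hs : s ≤ n)
    (hsorted : (l.take s).Pairwise (fun a b => a.1 ≤ b.1))
    (hcross : ∀ a ∈ l.take s, ∀ b ∈ l.drop s, a.1 ≤ b.1) :
    (pvOuterZ n (List.range' s (n - s)) l).Perm l ∧
    (pvOuterZ n (List.range' s (n - s)) l).Pairwise (fun a b => a.1 ≤ b.1) := by
  generalize hm : n - s = m
  induction m generalizing s l with
  | zero =>
    have hsn : s = n := by omega
    simp only [List.range'_zero, pvOuterZ]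
    subst hsn
    refine ⟨List.Perm.refl _, ?_⟩
    rw [← List.take_length (l := l), hn]
    exact hsorted
  | succ m ih =>
    have hsn : s < n := by omega
    rw [List.range'_succ]
    simp only [pvOuterZ]
    obtain ⟨ilen, igetD, iperm, imin⟩ := innerZ_spec s (s+1) l (by omega) (by omega)
    have hrange : List.range' (s+1) (l.length - (s+1)) = List.range' (s+1) (n - (s+1)) := by
      rw [hn]
    rw [hrange] at ilen igetD iperm imin
    set r := pvInnerZ s (List.range' (s+1) (n - (s+1))) l with hr
    have hrangeq : n - (s + 1) = m := by omega
    rw [hrangeq] at hr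
    have hrlen : r.length = n := by rw [← hn]; exact ilen
    have hldrop : l.drop s = l.getD s (0,0) :: l.drop (s+1) := drop_eq_getD_cons l s (by omega)
    have hrdrop : r.drop s = r.getD s (0,0) :: r.drop (s+1) := drop_eq_getD_cons r s (by omega)
    have htake : r.take s = l.take s :=
      take_eq_of_getD r l s (by omega) (by omega) (fun k hk => igetD k (by omega) (by omega))
    have hrmem : ∀ b ∈ r.getD s (0,0) :: r.drop (s+1), b ∈ l.drop s := by
      intro b hb
      rw [hldrop]
      exact (iperm.mem_iff).mp hb
    have hperm : r.Perm l := by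
      have h1 : r = r.take s ++ r.drop s := (List.take_append_drop s r).symm
      have h2 : l = l.take s ++ l.drop s := (List.take_append_drop s l).symm
      rw [h1, h2, htake]
      refine List.Perm.append_left _ ?_
      rw [hrdrop, hldrop]
      exact iperm
    have hrtake1 : r.take (s+1) = l.take s ++ [r.getD s (0,0)] := by
      rw [List.take_succ, htake]
      congr 1
      rw [List.getElem?_eq_getElem (by omega), List.getD_eq_getElem _ _ (by omega)]
      rfl
    have hsorted' : (r.take (s+1)).Pairwise (fun a b => a.1 ≤ b.1) := by
      rw [hrtake1, List.pairwise_append]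
      refine ⟨hsorted, List.pairwise_singleton _ _, ?_⟩
      intro a ha b hb
      rw [List.mem_singleton] at hb
      subst hb
      have : r.getD s (0,0) ∈ l.drop s := hrmem _ (List.mem_cons_self)
      exact hcross a ha _ this
    have hcross' : ∀ a ∈ r.take (s+1), ∀ b ∈ r.drop (s+1), a.1 ≤ b.1 := by
      intro a ha b hb
      have hbl : b ∈ l.drop s := hrmem b (List.mem_cons_of_mem _ hb)
      rw [hrtake1, List.mem_append] at ha
      rcases ha with ha | ha
      · exact hcross a ha b hbl
      · rw [List.mem_singleton] at ha
        subst ha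
        rw [← hldrop] at imin
        exact imin b hbl
    obtain ⟨operm, osorted⟩ := ih (s+1) r hrlen (by omega) hsorted' hcross' (by omega)
    exact ⟨operm.trans hperm, osorted⟩

-- ---- phase 2 of A on a sorted list ----

theorem sorted_le_iff (l : List (Int × Int)) (w : Int)
    (hp : l.Pairwise (fun a b => a.1 ≤ b.1)) (k : Nat) (hk : k < l.length) :
    ((l.getD k (0,0)).1 ≤ w ↔ k < l.countP (fun q => decide (q.1 ≤ w))) := by
  rw [List.getD_eq_getElem _ _ hk]
  induction l generalizing k with
  | nil => simp at hk
  | cons x t ih =>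
    rw [List.pairwise_cons] at hp
    cases k with
    | zero =>
      simp only [List.getElem_cons_zero]
      constructor
      · intro h
        have hx : (decide (x.1 ≤ w)) = true := by simpa using h
        rw [List.countP_cons, hx]; simp
      · intro h
        by_contra hc
        have ht : t.countP (fun q => decide (q.1 ≤ w)) = 0 := by
          rw [List.countP_eq_zero]
          intro q hq; have := hp.1 q hq; simp; omega
        have hx : (decide (x.1 ≤ w)) = false := by simp; omega
        rw [List.countP_cons, hx, ht] at h; simp at h
    | succ k' =>
      simp only [List.getElem_cons_succ]
      have hk' : k' < t.length := by simp at hk; omega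
      rw [ih hp.2 k' hk']
      constructor
      · intro h
        have hw : t[k'].1 ≤ w := (ih hp.2 k' hk').mpr h
        have hx : (decide (x.1 ≤ w)) = true := by
          simp only [decide_eq_true_eq]
          exact le_trans (hp.1 _ (List.getElem_mem hk')) hw
        rw [List.countP_cons, hx]; simp; omega
      · intro h
        rw [List.countP_cons] at h; split at h <;> omega

theorem sorted_filter_eq_take (l : List (Int × Int)) (w : Int)
    (hp : l.Pairwise (fun a b => a.1 ≤ b.1)) :
    l.filter (fun q => decide (q.1 ≤ w)) = l.take (l.countP (fun q => decide (q.1 ≤ w))) := by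
  have h1 : l.filter (fun q => decide (q.1 ≤ w)) = l.takeWhile (fun q => decide (q.1 ≤ w)) := by
    induction l with
    | nil => rfl
    | cons x t ih =>
      rw [List.pairwise_cons] at hp
      by_cases hx : (decide (x.1 ≤ w)) = true
      · simp only [List.filter_cons, List.takeWhile_cons, hx, if_pos, ih hp.2]
      · simp only [List.filter_cons, List.takeWhile_cons, hx]
        simp only [Bool.false_eq_true, if_false, cond_false]
        rw [List.filter_eq_nil_iff.mpr]
        intro q hq; have := hp.1 q hq; simp at hx ⊢; omega
  rw [List.countP_eq_length_filter, h1]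
  exact List.prefix_iff_eq_take.mp (List.takeWhile_prefix _)

theorem getD_map_fst (l : List (Int × Int)) (k : Nat) (h : k < l.length) :
    (l.map Prod.fst).getD k 0 = (l.getD k (0,0)).1 := by
  rw [List.getD_eq_getElem _ _ (by simp [h]), List.getD_eq_getElem _ _ h, List.getElem_map]

theorem scanA_spec (l : List (Int × Int)) (p : List Int) (w : Int) (m : Nat)
    (hp : l.Pairwise (fun a b => a.1 ≤ b.1))
    (hsuffix : p.take l.length = l.map Prod.snd)
    (hm : m ≤ l.length) (hc : l.countP (fun q => decide (q.1 ≤ w)) ≤ m) :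
    pvScanA (l.map Prod.fst) p w (List.range' 0 m).reverse = pvVal l w := by
  induction m with
  | zero =>
    simp only [List.range'_zero, List.reverse_nil, pvScanA]
    have h0 : l.countP (fun q => decide (q.1 ≤ w)) = 0 := by omega
    have : l.filter (fun q => decide (q.1 ≤ w)) = [] :=
      List.filter_eq_nil_iff.mpr (List.countP_eq_zero.mp h0)
    rw [pvVal, this]
    rfl
  | succ m ih =>
    have hrc : List.range' 0 (m+1) = List.range' 0 m ++ [m] := by
      have := List.range'_concat (s := 0) (n := m) (step := 1)
      simpa using this
    rw [hrc, List.reverse_append]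
    simp only [List.reverse_cons, List.reverse_nil, List.nil_append, List.cons_append, pvScanA]
    set c := l.countP (fun q => decide (q.1 ≤ w)) with hcdef
    have hcond : ((l.map Prod.fst).getD m 0 ≤ w) ↔ m < c := by
      rw [getD_map_fst l m (by omega)]
      exact sorted_le_iff l w hp m (by omega)
    by_cases hmw : (l.map Prod.fst).getD m 0 ≤ w
    · rw [if_pos hmw]
      have hcm : c = m + 1 := by have := hcond.mp hmw; omega
      have hcast : ((m : Int) + 1) = ((m+1 : Nat) : Int) := by push_cast; ring
      rw [hcast, PySem.List.slice_to_natCast]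
      have htake : p.take (m+1) = (l.map Prod.snd).take (m+1) := by
        rw [← hsuffix, List.take_take, min_eq_left (by omega)]
      rw [htake, ← List.map_take]
      have hfil : l.filter (fun q => decide (q.1 ≤ w)) = l.take (m+1) := by
        rw [sorted_filter_eq_take l w hp, ← hcdef, hcm]
      rw [pvVal, hfil]
      have hlen : (l.take (m+1)).length = m+1 := by simp; omega
      obtain ⟨x, t, hxt⟩ : ∃ x t, l.take (m+1) = x :: t := by
        cases h : l.take (m+1) with
        | nil => rw [h] at hlen; simp at hlen
        | cons x t => exact ⟨x, t, rfl⟩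
      rw [hxt]
      simp only [List.map_cons]
      rw [PySem.List.max?_id_cons]
      rfl
    · rw [if_neg hmw]
      have : ¬ m < c := fun hh => hmw (hcond.mpr hh)
      exact ih (by omega) (by omega)

-- ---- B's pieces ----

theorem bsr_spec (ds : List Int) (w : Int) (c : Nat) (lo hi : Nat)
    (hch : ∀ k, k < ds.length → (ds.getD k 0 ≤ w ↔ k < c))
    (hlo : lo ≤ c) (hhi : c ≤ hi) (hn : hi ≤ ds.length) :
    pvBsr ds w lo hi = c := by
  revert hlo hhi hn
  induction lo, hi using pvBsr.induct (ds := ds) (w := w) with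
  | case1 lo hi h mid hle ih =>
    intro hlo hhi hn
    rw [pvBsr, dif_pos h, if_pos (by exact hle)]
    have : mid < c := (hch _ (by omega)).mp hle
    exact ih (by omega) hhi hn
  | case2 lo hi h mid hle ih =>
    intro hlo hhi hn
    rw [pvBsr, dif_pos h, if_neg (by exact hle)]
    have : ¬ mid < c := fun hc => hle ((hch _ (by omega)).mpr hc)
    exact ih hlo (by omega) (by omega)
  | case3 lo hi h =>
    intro hlo hhi hn
    rw [pvBsr, dif_neg h]
    omega

def pvPmax : List Int → Int → List Int
  | [], _ => []
  | p :: t, cur => (max cur p) :: pvPmax t (max cur p)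

theorem getLastD_cons' (l : List Int) : ∀ (a d : Int), (a :: l).getLast?.getD d = l.getLast?.getD a := by
  induction l with
  | nil => intro a d; rfl
  | cons b l ih =>
    intro a d
    rw [List.getLast?_cons_cons]
    obtain ⟨x, hx⟩ := Option.isSome_iff_exists.mp (List.getLast?_isSome.mpr (List.cons_ne_nil b l))
    rw [hx]; rfl

theorem best_fold (t : List (Int × Int)) : ∀ (acc : List Int) (cur : Int), acc ≠ [] →
    (t.foldl (fun (acc : List Int × Int) jp =>
      let cur := if acc.1.isEmpty then jp.2 else max acc.2 jp.2
      (acc.1 ++ [cur], cur)) (acc, cur)) =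
    (acc ++ pvPmax (t.map Prod.snd) cur, (pvPmax (t.map Prod.snd) cur).getLast?.getD cur) := by
  induction t with
  | nil => intro acc cur h; simp [pvPmax]
  | cons p t ih =>
    intro acc cur h
    simp only [List.foldl_cons, List.isEmpty_eq_false_iff.mpr h]
    simp only [Bool.false_eq_true, if_false]
    rw [ih (acc ++ [max cur p.2]) (max cur p.2) (by simp)]
    simp only [List.map_cons, pvPmax, List.append_assoc, List.singleton_append]
    rw [getLastD_cons']

theorem pvBest_eq (jobs : List (Int × Int)) :
    (pvBest jobs).1 = match jobs.map Prod.snd with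
      | [] => []
      | p :: t => p :: pvPmax t p := by
  cases jobs with
  | nil => rfl
  | cons j t =>
    change (t.foldl (fun (acc : List Int × Int) jp =>
      let cur := if acc.1.isEmpty then jp.2 else max acc.2 jp.2
      (acc.1 ++ [cur], cur)) ([j.2], j.2)).1 = _
    rw [best_fold t [j.2] j.2 (by simp)]
    simp

theorem pvPmax_getD (t : List Int) : ∀ (cur : Int) (k : Nat), k < t.length →
    (pvPmax t cur).getD k 0 = (t.take (k+1)).foldl max cur := by
  induction t with
  | nil => intro cur k h; simp at h
  | cons p t ih =>
    intro cur k h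
    cases k with
    | zero => simp [pvPmax]
    | succ k' =>
      simp only [pvPmax, List.getD_cons_succ, List.take_succ_cons, List.foldl_cons]
      exact ih (max cur p) k' (by simp at h; omega)

theorem best_spec (jobs : List (Int × Int)) (c : Nat) (hc : 0 < c) (hlen : c ≤ jobs.length) :
    ((pvBest jobs).1).getD (c - 1) 0 = ((jobs.take c).map Prod.snd).max?.getD 0 := by
  rw [pvBest_eq, List.map_take]
  cases h : jobs.map Prod.snd with
  | nil => simp at h; subst h; simp at hlen; omega
  | cons p t =>
    have hlt : t.length + 1 = jobs.length := by
      have := congrArg List.length h; simp at this; omega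
    cases hck : c - 1 with
    | zero =>
      have : c = 1 := by omega
      subst this
      simp [h, List.max?]
    | succ k' =>
      have hc2 : c = k' + 2 := by omega
      subst hc2
      simp only [List.getD_cons_succ, h]
      rw [pvPmax_getD t p k' (by omega)]
      simp only [List.take_succ_cons, List.max?]
      rfl

-- ---- assembling both sides into sums of the common per-worker values ----

theorem foldA_sum (f : Int → Option Int) (ws : List Int) : ∀ acc : List Int,
    (ws.foldl (fun acc w => match f w with | some m => acc ++ [m] | none => acc) acc).sum
      = acc.sum + (ws.map (fun w => (f w).getD 0)).sum := by
  induction ws with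
  | nil => intro acc; simp
  | cons w ws ih =>
    intro acc
    simp only [List.foldl_cons, List.map_cons, List.sum_cons]
    cases hf : f w with
    | none => rw [ih]; simp
    | some m => rw [ih]; simp; ring

theorem foldB_sum (g : Int → Int) (ws : List Int) : ∀ t : Int,
    ws.foldl (fun t w => t + g w) t = t + (ws.map g).sum := by
  induction ws with
  | nil => intro t; simp
  | cons w ws ih =>
    intro t
    simp only [List.foldl_cons, List.map_cons, List.sum_cons]
    rw [ih]; ring

-- ===== VERDICT (by name: the statement is the Claim_ definition above) =====
theorem answer826_spec : Claim_equal_answer826 := by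
  intro dif pro wrk _hdom hpre
  unfold Spec_answer826 Pre_answer826 at *
  set n := dif.length with hn
  set pairs := dif.zip pro with hpairs
  have hplen : pairs.length = n := by simp [hpairs]; omega
  -- A's sorted pair list
  set LA := pvOuterZ n (List.range' 0 n) pairs with hLA
  obtain ⟨hApm, hAsort⟩ := by
    have h := outerZ_spec n 0 pairs hplen (by omega) (by simp) (by simp)
    rwa [Nat.sub_zero] at h
  have hALen : LA.length = n := hApm.length_eq.trans hplen
  -- B's sorted pair list
  set LB := PySem.List.sorted pairs (fun j => j.1) false with hLB
  have hBpm : LB.Perm pairs := PySem.List.sorted_perm pairs _ false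
  have hBsort : LB.Pairwise (fun a b => a.1 ≤ b.1) := PySem.List.sorted_pairwise pairs _
  have hBlen : LB.length = n := hBpm.length_eq.trans hplen
  have hval : ∀ w, pvVal LA w = pvVal LB w :=
    fun w => pvVal_perm LA LB (hApm.trans hBpm.symm) w
  -- the common per-worker contribution
  set g : Int → Int := fun w => (pvVal LB w).getD 0 with hg
  -- ===== A equals the sum of g =====
  have hA : answer826 dif pro wrk = (wrk.map g).sum := by
    show (wrk.foldl _ []).sum = _
    have hsim := outerA_sim n (List.range' 0 n) dif pro hn.symm hpre
      (by intro i hi; rw [List.mem_range'] at hi; omega)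
    rw [hsim]
    have hsuffix : (LA.map Prod.snd ++ pro.drop n).take LA.length = LA.map Prod.snd := by
      rw [hALen, List.take_append_of_le_length (by simp [hALen]), List.take_of_length_le (by simp [hALen])]
    have hscan : ∀ w, pvScanA (LA.map Prod.fst) (LA.map Prod.snd ++ pro.drop n) w
        (List.range' 0 n).reverse = pvVal LA w := by
      intro w
      have := scanA_spec LA (LA.map Prod.snd ++ pro.drop n) w n hAsort hsuffix (by omega)
        (le_trans List.countP_le_length (by omega))
      exact this
    have hfuneq : (fun (acc : List Int) w =>
        match pvScanA (LA.map Prod.fst) (LA.map Prod.snd ++ pro.drop n) w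
          (List.range' 0 n).reverse with
        | some m => acc ++ [m]
        | none => acc) =
        (fun (acc : List Int) w =>
        match pvVal LA w with
        | some m => acc ++ [m]
        | none => acc) := by
      funext acc w
      rw [hscan w]
    rw [hfuneq, foldA_sum (fun w => pvVal LA w) wrk []]
    simp only [List.sum_nil, zero_add]
    refine congrArg List.sum (List.map_congr_left ?_)
    intro w _
    show (pvVal LA w).getD 0 = (pvVal LB w).getD 0
    rw [hval w]
  -- ===== B equals the sum of g =====
  have hB : answer826_alt dif pro wrk = (wrk.map g).sum := by
    show wrk.foldl _ 0 = _
    have hds : ∀ w, pvBsr (LB.map (fun j => j.1)) w 0 (LB.map (fun j => j.1)).length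
        = LB.countP (fun q => decide (q.1 ≤ w)) := by
      intro w
      refine bsr_spec _ w _ 0 _ ?_ (by omega) (by simp only [List.length_map]; exact List.countP_le_length) (by simp)
      intro k hk
      simp only [List.length_map] at hk
      have h1 : (LB.map (fun j : Int × Int => j.1)).getD k 0 = (LB.getD k (0,0)).1 :=
        getD_map_fst LB k hk
      rw [h1]
      exact sorted_le_iff LB w hBsort k hk
    have hstep : ∀ (t : Int) (w : Int),
        (fun (total : Int) w =>
          let lo := pvBsr (LB.map (fun j => j.1)) w 0 (LB.map (fun j => j.1)).length
          if lo ≠ 0 then total + (pvBest LB).1.getD (lo - 1) 0 else total) t w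
        = t + g w := by
      intro t w
      simp only [hds w]
      set c := LB.countP (fun q => decide (q.1 ≤ w)) with hcdef
      by_cases hc0 : c = 0
      · rw [if_neg (by omega)]
        have hfil : LB.filter (fun q => decide (q.1 ≤ w)) = [] :=
          List.filter_eq_nil_iff.mpr (List.countP_eq_zero.mp hc0)
        simp [hg, pvVal, hfil]
      · rw [if_pos (by omega)]
        rw [best_spec LB c (by omega) (by rw [hcdef]; exact List.countP_le_length)]
        congr 1
        rw [hg]
        simp only []
        rw [pvVal, sorted_filter_eq_take LB w hBsort, ← hcdef]
    have hfuneq : (fun (total : Int) w =>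
        let lo := pvBsr (LB.map (fun j => j.1)) w 0 (LB.map (fun j => j.1)).length
        if lo ≠ 0 then total + (pvBest LB).1.getD (lo - 1) 0 else total)
        = (fun t w => t + g w) := by
      funext t w
      exact hstep t w
    rw [hfuneq, foldB_sum g wrk 0, zero_add]
  rw [hA, hB]
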